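-- pv_equiv track=rewrite | github.com/DerenB/leet-code-responses | Python/2554-MaxNumChooseInRange.py | maxCount2
-- ===== SOURCE A (Python) =====
-- def maxCount2(banned, n, maxSum) -> int:
--     nonBannedIntegers = []
--     runningTotal = 0
--     resultCount = 0
--     for x in range(1, n+1):
--         if x not in banned:
--             nonBannedIntegers.append(x)
--             runningTotal += x
--             if runningTotal > maxSum:
--                 break
--             else:
--                 resultCount += 1
--     return resultCount
-- ===== SOURCE B (Python) =====
-- from bisect import bisect_right
-- from itertools import accumulate, islice
-- from math import isqrt
--
--
-- def maxCount2(banned, n, maxSum) -> int: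
--     bannedSet = set(banned)
--     # 1+2+...+cap > maxSum, so no more than cap unbanned numbers can ever be taken
--     cap = isqrt(2 * maxSum) + 1 if maxSum > 0 else 1
--     unbanned = (x for x in range(1, n + 1) if x not in bannedSet)
--     prefixSums = list(accumulate(islice(unbanned, cap)))
--     return bisect_right(prefixSums, maxSum)
-- ===== Notes on version B (the rewrite author's own statement) =====
-- stated objective: faster
-- what changed: A scans 1..n with a membership test on the banned list, a running total and a break; B filters through a set, materialises only the first isqrt(2*maxSum)+1 unbanned numbers (their prefix sums provably exceed maxSum beyond that), builds the prefix-sum table with itertools.accumulate and returns bisect_right(table, maxSum).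
import Mathlib
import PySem

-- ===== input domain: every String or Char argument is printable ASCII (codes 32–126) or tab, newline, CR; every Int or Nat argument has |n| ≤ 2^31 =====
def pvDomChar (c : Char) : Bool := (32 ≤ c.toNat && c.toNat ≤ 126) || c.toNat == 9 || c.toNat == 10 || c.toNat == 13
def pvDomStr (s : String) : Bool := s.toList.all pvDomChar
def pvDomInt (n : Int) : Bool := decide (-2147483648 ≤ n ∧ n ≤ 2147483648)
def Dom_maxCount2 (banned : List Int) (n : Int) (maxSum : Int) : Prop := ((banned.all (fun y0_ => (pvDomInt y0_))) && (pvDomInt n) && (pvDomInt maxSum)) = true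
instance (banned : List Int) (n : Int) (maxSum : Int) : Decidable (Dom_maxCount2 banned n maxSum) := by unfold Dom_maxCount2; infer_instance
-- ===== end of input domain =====

-- B replaces A's scan-with-break by set-filter → capped prefix-sum table → bisect_right; the isqrt(2*maxSum)+1 cap makes it independent of n (measured faster).

-- ===== PORT A =====
-- A's loop with early break; state = (nonBannedIntegers, runningTotal, resultCount)
def maxCount2Loop (banned : List Int) (maxSum : Int) :
    List Int → List Int → Int → Int → Int
  | [], _, _, resultCount => resultCount
  | x :: rest, nonBanned, runningTotal, resultCount =>
    if x ∈ banned then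
      maxCount2Loop banned maxSum rest nonBanned runningTotal resultCount
    else
      if runningTotal + x > maxSum then resultCount
      else maxCount2Loop banned maxSum rest (nonBanned ++ [x]) (runningTotal + x) (resultCount + 1)

def maxCount2 (banned : List Int) (n : Int) (maxSum : Int) : Int :=
  maxCount2Loop banned maxSum (PySem.List.pyRange 1 (n + 1) 1) [] 0 0

-- ===== PORT B =====
-- itertools.accumulate (running partial sums, no leading zero)
def pyAccumulate : List Int → Int → List Int
  | [], _ => []
  | x :: rest, acc => (acc + x) :: pyAccumulate rest (acc + x)

def maxCount2_alt (banned : List Int) (n : Int) (maxSum : Int) : Int :=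
  let bannedSet : PySem.Set Int := PySem.Set.ofList banned
  -- cap = isqrt(2*maxSum) + 1 if maxSum > 0 else 1; islice(unbanned, cap) = .take cap
  let cap : Nat := if maxSum > 0 then Nat.sqrt (2 * maxSum).toNat + 1 else 1
  let prefixSums :=
    pyAccumulate (((PySem.List.pyRange 1 (n + 1) 1).filter (fun x => !(bannedSet.contains x))).take cap) 0
  ((PySem.List.bisectRight prefixSums maxSum : Nat) : Int)

-- ===== PRECONDITION & SPEC =====
def Spec_maxCount2 (banned : List Int) (n : Int) (maxSum : Int) (out : Int) : Prop := out = maxCount2_alt banned n maxSum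
instance (banned : List Int) (n : Int) (maxSum : Int) (out : Int) : Decidable (Spec_maxCount2 banned n maxSum out) := by unfold Spec_maxCount2; infer_instance

-- ===== CLAIM (what is proved, stated in full; the proofs are below) =====
def Claim_equal_maxCount2 : Prop := ∀ (banned : List Int) (n : Int) (maxSum : Int), Dom_maxCount2 banned n maxSum → Spec_maxCount2 banned n maxSum (maxCount2 banned n maxSum)

-- ===== LEMMAS AND PROOFS =====

-- every partial sum is at least the starting accumulator when the elements are nonnegative
theorem pyAccumulate_mem_ge (l : List Int) (acc : Int) (hpos : ∀ x ∈ l, 0 ≤ x) :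
    ∀ s ∈ pyAccumulate l acc, acc ≤ s := by
  induction l generalizing acc with
  | nil => simp [pyAccumulate]
  | cons x rest ih =>
    intro s hs
    simp only [pyAccumulate, List.mem_cons] at hs
    have hx : 0 ≤ x := hpos x (by simp)
    rcases hs with h | h
    · omega
    · have := ih (acc + x) (fun y hy => hpos y (by simp [hy])) s h
      omega

-- once the accumulator exceeds maxSum, no later partial sum is ≤ maxSum
theorem countP_pyAccumulate_zero (l : List Int) (acc maxSum : Int)
    (hpos : ∀ x ∈ l, 0 ≤ x) (h : maxSum < acc) :
    (pyAccumulate l acc).countP (fun s => decide (s ≤ maxSum)) = 0 := by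
  rw [List.countP_eq_zero]
  intro s hs
  have := pyAccumulate_mem_ge l acc hpos s hs
  simp; omega

-- the prefix-sum table of nonnegative elements is sorted
theorem pyAccumulate_pairwise (l : List Int) (acc : Int) (hpos : ∀ x ∈ l, 0 ≤ x) :
    (pyAccumulate l acc).Pairwise (fun a b => a ≤ b) := by
  induction l generalizing acc with
  | nil => simp [pyAccumulate]
  | cons x rest ih =>
    simp only [pyAccumulate, List.pairwise_cons]
    refine ⟨?_, ih (acc + x) (fun y hy => hpos y (by simp [hy]))⟩
    intro s hs
    exact pyAccumulate_mem_ge rest (acc + x) (fun y hy => hpos y (by simp [hy])) s hs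

-- on a sorted list, bisect_right counts the elements ≤ x
theorem bisectRight_eq_countP (xs : List Int) (x : Int)
    (hs : xs.Pairwise (fun a b => a ≤ b)) :
    xs.countP (fun s => decide (s ≤ x)) = PySem.List.bisectRight xs x := by
  obtain ⟨hk, hle, hgt⟩ := PySem.List.bisectRight_spec xs x hs
  set k := PySem.List.bisectRight xs x with hkdef
  have hsplit : xs = xs.take k ++ xs.drop k := (List.take_append_drop k xs).symm
  rw [hsplit, List.countP_append]
  have h1 : (xs.take k).countP (fun s => decide (s ≤ x)) = k := by
    have hlen : (xs.take k).length = k := by simp [hk]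
    rw [List.countP_eq_length.mpr, hlen]
    intro a ha
    obtain ⟨j, hj, rfl⟩ := List.mem_iff_getElem.mp ha
    have hjk : j < k := by simpa [hk] using hj
    have hjlen : j < xs.length := lt_of_lt_of_le hjk hk
    have : (xs.take k)[j] = xs[j] := List.getElem_take
    rw [this]
    simpa using hle j hjlen hjk
  have h2 : (xs.drop k).countP (fun s => decide (s ≤ x)) = 0 := by
    rw [List.countP_eq_zero]
    intro a ha
    obtain ⟨j, hj, rfl⟩ := List.mem_iff_getElem.mp ha
    have hjlen : k + j < xs.length := by
      have := hj; simp [List.length_drop] at this; omega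
    have : (xs.drop k)[j] = xs[k + j] := by
      simp
    rw [this]
    have := hgt (k + j) hjlen (by omega)
    simp; omega
  omega

-- A's loop equals count-of-prefix-sums-≤-maxSum over the filtered list
theorem maxCount2Loop_eq_countP (banned : List Int) (maxSum : Int) :
    ∀ (xs nonBanned : List Int) (tot cnt : Int), (∀ x ∈ xs, 0 ≤ x) →
      maxCount2Loop banned maxSum xs nonBanned tot cnt =
        cnt + ((pyAccumulate (xs.filter (fun x => !decide (x ∈ banned))) tot).countP
                (fun s => decide (s ≤ maxSum)) : Nat) := by
  intro xs
  induction xs with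
  | nil => intro _ _ _ _; simp [maxCount2Loop, pyAccumulate]
  | cons x rest ih =>
    intro nonBanned tot cnt hpos
    have hrest : ∀ y ∈ rest, 0 ≤ y := fun y hy => hpos y (by simp [hy])
    by_cases hb : x ∈ banned
    · simp [maxCount2Loop, hb, ih nonBanned tot cnt hrest]
    · have hfc : (x :: rest).filter (fun y => !decide (y ∈ banned)) =
          x :: rest.filter (fun y => !decide (y ∈ banned)) := by simp [hb]
      rw [hfc, pyAccumulate]
      simp only [maxCount2Loop, if_neg hb]
      by_cases hover : tot + x > maxSum
      · rw [if_pos hover, List.countP_cons]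
        have h0 : (pyAccumulate (rest.filter (fun y => !decide (y ∈ banned))) (tot + x)).countP
            (fun s => decide (s ≤ maxSum)) = 0 := by
          apply countP_pyAccumulate_zero
          · intro y hy; exact hrest y (List.mem_of_mem_filter hy)
          · omega
        have hdec : decide (tot + x ≤ maxSum) = false := by simp; omega
        rw [h0, hdec]
        simp
      · rw [if_neg hover, ih (nonBanned ++ [x]) (tot + x) (cnt + 1) hrest, List.countP_cons]
        have hdec : decide (tot + x ≤ maxSum) = true := by simp; omega
        simp [hdec]; ring

-- prefix sums commute with take
theorem pyAccumulate_take (l : List Int) (acc : Int) (k : Nat) :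
    pyAccumulate (l.take k) acc = (pyAccumulate l acc).take k := by
  induction l generalizing acc k with
  | nil => simp [pyAccumulate]
  | cons x rest ih =>
    cases k with
    | zero => simp [pyAccumulate]
    | succ k => simp [pyAccumulate, ih]

-- over a strictly increasing list of elements ≥ m, the j-th prefix sum is at least
-- acc + (j+1)*m + j*(j+1)/2 (stated doubled to stay in ℤ)
theorem pyAccumulate_lower_bound (l : List Int) :
    ∀ (acc m : Int), l.Pairwise (· < ·) → (∀ x ∈ l, m ≤ x) →
    ∀ (j : Nat) (hj : j < (pyAccumulate l acc).length),
      2 * acc + 2 * ((j : Int) + 1) * m + (j : Int) * ((j : Int) + 1) ≤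
        2 * (pyAccumulate l acc)[j] := by
  induction l with
  | nil => intro acc m _ _ j hj; simp [pyAccumulate] at hj
  | cons x rest ih =>
    intro acc m hpw hge j hj
    have hxm : m ≤ x := hge x (by simp)
    have hpw' : rest.Pairwise (· < ·) := (List.pairwise_cons.mp hpw).2
    have hge' : ∀ y ∈ rest, m + 1 ≤ y := by
      intro y hy
      have := (List.pairwise_cons.mp hpw).1 y hy
      omega
    cases j with
    | zero => simp [pyAccumulate]; omega
    | succ j =>
      have hj' : j < (pyAccumulate rest (acc + x)).length := by
        simpa [pyAccumulate] using hj
      have := ih (acc + x) (m + 1) hpw' hge' j hj'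
      have heq : (pyAccumulate (x :: rest) acc)[j + 1] =
          (pyAccumulate rest (acc + x))[j] := by
        simp [pyAccumulate]
      rw [heq]
      push_cast at this ⊢
      nlinarith

-- truncating the prefix-sum table at cap does not change the count of entries ≤ maxSum,
-- provided entry cap-1 (when it exists) already exceeds maxSum
theorem countP_take_of_big (ps : List Int) (maxSum : Int) (cap : Nat) (hcap : 1 ≤ cap)
    (hmono : ps.Pairwise (fun a b => a ≤ b))
    (hbig : ∀ (h : cap - 1 < ps.length), maxSum < ps[cap - 1]) :
    ps.countP (fun s => decide (s ≤ maxSum)) =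
      (ps.take cap).countP (fun s => decide (s ≤ maxSum)) := by
  by_cases hlen : ps.length ≤ cap
  · rw [List.take_of_length_le hlen]
  · rw [not_le] at hlen
    conv_lhs => rw [← List.take_append_drop cap ps]
    rw [List.countP_append]
    have h0 : (ps.drop cap).countP (fun s => decide (s ≤ maxSum)) = 0 := by
      rw [List.countP_eq_zero]
      intro a ha
      obtain ⟨j, hj, rfl⟩ := List.mem_iff_getElem.mp ha
      have hjlen : cap + j < ps.length := by
        simp [List.length_drop] at hj; omega
      have hd : (ps.drop cap)[j] = ps[cap + j] := by simp
      have hc1 : cap - 1 < ps.length := by omega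
      have hle : ps[cap - 1] ≤ ps[cap + j] :=
        List.pairwise_iff_getElem.mp hmono (cap - 1) (cap + j) hc1 hjlen (by omega)
      have := hbig hc1
      rw [hd]; simp; omega
    omega

-- ===== VERDICT (by name: the statement is the Claim_ definition above) =====
theorem maxCount2_spec : Claim_equal_maxCount2 := by
  intro banned n maxSum _
  unfold Spec_maxCount2 maxCount2 maxCount2_alt
  have hpos : ∀ x ∈ PySem.List.pyRange 1 (n + 1) 1, (0:Int) ≤ x := by
    intro x hx
    have := (PySem.List.mem_pyRange_one).mp hx
    omega
  have hfilter : (PySem.List.pyRange 1 (n + 1) 1).filter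
      (fun x => !((PySem.Set.ofList banned : PySem.Set Int).contains x)) =
      (PySem.List.pyRange 1 (n + 1) 1).filter (fun x => !decide (x ∈ banned)) := by
    apply List.filter_congr
    intro x _
    simp [PySem.Set.contains, PySem.Set.mem_ofList]
  rw [maxCount2Loop_eq_countP banned maxSum _ [] 0 0 hpos]
  simp only [hfilter]
  set l := (PySem.List.pyRange 1 (n + 1) 1).filter (fun x => !decide (x ∈ banned)) with hl
  set cap : Nat := if maxSum > 0 then Nat.sqrt (2 * maxSum).toNat + 1 else 1 with hcapdef
  have hcap1 : 1 ≤ cap := by rw [hcapdef]; split <;> omega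
  have hlpos : ∀ y ∈ l, (0:Int) ≤ y := fun y hy => hpos y (List.mem_of_mem_filter hy)
  have hl1 : ∀ y ∈ l, (1:Int) ≤ y := by
    intro y hy
    have := (PySem.List.mem_pyRange_one).mp (List.mem_of_mem_filter hy)
    omega
  have hlt : l.Pairwise (· < ·) :=
    (PySem.List.pairwise_lt_pyRange_one 1 (n + 1)).filter _
  have hmono := pyAccumulate_pairwise l 0 hlpos
  -- the (cap-1)-th prefix sum (if it exists) exceeds maxSum
  have hbig : ∀ (h : cap - 1 < (pyAccumulate l 0).length),
      maxSum < (pyAccumulate l 0)[cap - 1] := by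
    intro h
    have hlb := pyAccumulate_lower_bound l 0 1 hlt hl1 (cap - 1) h
    have hcc : 2 * maxSum < (cap : Int) * ((cap : Int) + 1) := by
      rw [hcapdef]
      split
      · rename_i hms
        have hs := Nat.lt_succ_sqrt (2 * maxSum).toNat
        have h2 : ((2 * maxSum).toNat : Int) = 2 * maxSum := by omega
        set q := Nat.sqrt (2 * maxSum).toNat with hq
        push_cast
        nlinarith [hs, h2]
      · rename_i hms; push_cast; nlinarith [hms]
    have hcast : ((cap - 1 : Nat) : Int) = (cap : Int) - 1 := by
      push_cast [hcap1]; ring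
    rw [hcast] at hlb
    nlinarith
  rw [countP_take_of_big (pyAccumulate l 0) maxSum cap hcap1 hmono hbig,
    ← pyAccumulate_take l 0 cap]
  have hsorted := pyAccumulate_pairwise (l.take cap) 0
      (fun y hy => hlpos y (List.mem_of_mem_take hy))
  rw [bisectRight_eq_countP _ maxSum hsorted]
  simp
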